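-- pv_equiv track=rewrite | github.com/songweizhi/FlowCellBiofilm | tmp_6_RSCU.py | _synonymous_codons
-- ===== SOURCE A (Python) =====
-- def _synonymous_codons(genetic_code_dict):
--
--     # invert the genetic code dictionary to map each amino acid to its codons
--     codons_for_amino_acid = {}
--     for codon, amino_acid in genetic_code_dict.items():
--         codons_for_amino_acid[amino_acid] = codons_for_amino_acid.get(amino_acid, [])
--         codons_for_amino_acid[amino_acid].append(codon)
--
--     # create dictionary of synonymous codons
--     # Example: {'CTT': ['CTT', 'CTG', 'CTA', 'CTC', 'TTA', 'TTG'], 'ATG': ['ATG']...}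
--     return {
--         codon: codons_for_amino_acid[genetic_code_dict[codon]]
--         for codon in genetic_code_dict.keys()
--     }
-- ===== SOURCE B (Python) =====
-- def _synonymous_codons(genetic_code_dict):
--     # sort-and-group: stable sort by amino acid, then one scan collecting
--     # runs of equal amino acids (no inverted-index dict built by get/append)
--     items = sorted(genetic_code_dict.items(), key=lambda kv: kv[1])
--     aa_to_codons = {}
--     group = []
--     prev = None
--     for codon, aa in items:
--         if group and aa != prev:
--             aa_to_codons[prev] = group
--             group = []
--         group.append(codon)
--         prev = aa
--     if group:
--         aa_to_codons[prev] = group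
--     return {codon: aa_to_codons[aa] for codon, aa in genetic_code_dict.items()}
-- ===== Notes on version B (the rewrite author's own statement) =====
-- stated objective: alternative
-- what changed: B replaces A's hash-based inverted index (aa -> codon list built by dict get/append) with a sort-and-group strategy: stable-sort the items by amino acid, collect runs of equal amino acids in one scan, then map each codon to its run.
import Mathlib
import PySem

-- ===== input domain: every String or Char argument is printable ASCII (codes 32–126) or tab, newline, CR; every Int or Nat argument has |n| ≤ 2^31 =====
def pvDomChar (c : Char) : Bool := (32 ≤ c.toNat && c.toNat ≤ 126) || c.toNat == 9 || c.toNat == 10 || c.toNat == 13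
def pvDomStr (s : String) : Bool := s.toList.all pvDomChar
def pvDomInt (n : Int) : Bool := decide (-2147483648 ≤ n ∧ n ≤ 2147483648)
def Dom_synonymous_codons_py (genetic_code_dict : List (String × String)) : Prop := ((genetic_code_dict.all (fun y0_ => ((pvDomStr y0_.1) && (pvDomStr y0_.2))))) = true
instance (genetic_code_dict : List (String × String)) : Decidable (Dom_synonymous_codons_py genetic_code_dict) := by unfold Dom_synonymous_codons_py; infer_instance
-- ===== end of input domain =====

-- B replaces A's hash-based inverted index with a stable sort by amino acid followed by one run-collecting scan (alternative algorithm).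

-- ===== PORT A =====
-- for codon, amino_acid in items: d[aa] = d.get(aa, []); d[aa].append(codon)  — i.e. d.modify aa [] (· ++ [codon])
-- then {codon: d[genetic_code_dict[codon]] for codon in keys}; inside Pre_ both lookups always succeed, so getD's defaults are unreachable
def synonymous_codons_py (genetic_code_dict : List (String × String)) : List (String × List String) :=
  let codons_for_amino_acid : PySem.Dict String (List String) :=
    genetic_code_dict.foldl (fun d p => d.modify p.2 [] (· ++ [p.1])) PySem.Dict.empty
  genetic_code_dict.map (fun p =>
    (p.1, codons_for_amino_acid.getD ((PySem.Dict.mk genetic_code_dict).getD p.1 "") []))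

-- ===== PORT B =====
-- loop body of Source B: 'if group and aa != prev: aa_to_codons[prev] = group; group = []' then 'group.append(codon); prev = aa'
-- ('prev' is None only while 'group' is empty, so the flush key 's.2.2.getD ""' is never the default)
def pvStep (s : PySem.Dict String (List String) × List String × Option String)
    (p : String × String) : PySem.Dict String (List String) × List String × Option String :=
  if s.2.1 ≠ [] ∧ some p.2 ≠ s.2.2 then
    (s.1.insert (s.2.2.getD "") s.2.1, [p.1], some p.2)
  else
    (s.1, s.2.1 ++ [p.1], some p.2)

-- trailing 'if group: aa_to_codons[prev] = group'
def pvFinish (s : PySem.Dict String (List String) × List String × Option String) :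
    PySem.Dict String (List String) :=
  if s.2.1 ≠ [] then s.1.insert (s.2.2.getD "") s.2.1 else s.1

-- every amino acid of the dict is a key of aa_to_codons, so the final lookup's default is unreachable
def synonymous_codons_py_alt (genetic_code_dict : List (String × String)) : List (String × List String) :=
  let items := PySem.List.sorted genetic_code_dict (fun kv => kv.2) false
  let aa_to_codons := pvFinish (items.foldl pvStep (PySem.Dict.empty, [], none))
  genetic_code_dict.map (fun p => (p.1, aa_to_codons.getD p.2 []))

-- ===== PRECONDITION & SPEC =====
-- Pre_ excludes association lists with duplicate codon keys: a Python dict cannot hold duplicate keys, so such lists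
-- correspond to no input A ever receives.
def Pre_synonymous_codons_py (genetic_code_dict : List (String × String)) : Prop :=
  (genetic_code_dict.map Prod.fst).Nodup
instance (genetic_code_dict : List (String × String)) : Decidable (Pre_synonymous_codons_py genetic_code_dict) := by unfold Pre_synonymous_codons_py; infer_instance
def pvWitness_synonymous_codons_py : (List (String × String)) :=
  [("CTT", "L"), ("CTG", "L"), ("ATG", "M"), ("TTA", "L")]
def Spec_synonymous_codons_py (genetic_code_dict : List (String × String)) (out : List (String × List String)) : Prop := out = synonymous_codons_py_alt genetic_code_dict
instance (genetic_code_dict : List (String × String)) (out : List (String × List String)) : Decidable (Spec_synonymous_codons_py genetic_code_dict out) := by unfold Spec_synonymous_codons_py; infer_instance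

-- ===== CLAIM (what is proved, stated in full; the proofs are below) =====
def Claim_equal_synonymous_codons_py : Prop := ∀ (genetic_code_dict : List (String × String)), Dom_synonymous_codons_py genetic_code_dict → Pre_synonymous_codons_py genetic_code_dict → Spec_synonymous_codons_py genetic_code_dict (synonymous_codons_py genetic_code_dict)

-- ===== LEMMAS AND PROOFS =====

-- ---- A-side: the grouping loop builds, for each amino acid, the filter of its codons ----
theorem pv_group_getD (g : List (String × String)) (aa : String) :
    (g.foldl (fun (d : PySem.Dict String (List String)) p => d.modify p.2 [] (· ++ [p.1]))
        PySem.Dict.empty).getD aa []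
      = (g.filter (fun q => q.2 == aa)).map Prod.fst := by
  have h : g.foldl (fun (d : PySem.Dict String (List String)) p => d.modify p.2 [] (· ++ [p.1]))
        PySem.Dict.empty
      = (g.map Prod.swap).foldl (fun d p => d.modify p.1 [] (· ++ [p.2])) PySem.Dict.empty := by
    rw [List.foldl_map]; rfl
  rw [h, PySem.Dict.getD_foldl_modify_append]
  simp [PySem.Dict.getD_empty, List.filter_map, Function.comp_def, Prod.swap]

-- Inside Pre_, looking the codon up in the dict gives its own amino acid.
theorem pv_lookup_self (g : List (String × String)) (hpre : (g.map Prod.fst).Nodup)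
    (p : String × String) (hp : p ∈ g) :
    (PySem.Dict.mk g).getD p.1 "" = p.2 := by
  apply PySem.Dict.getD_of_mem_items (v := p.2)
  · simpa [PySem.Dict.items] using hp
  · simpa [PySem.Dict.keys] using hpre

-- ---- B-side: stability of the sort w.r.t. the equal-amino-acid filter ----
theorem pv_filter_insertBy_ne (x : String × String) (ys : List (String × String)) (aa : String)
    (hx : x.2 ≠ aa) :
    (PySem.List.insertBy (fun a b => decide (a.2 < b.2)) x ys).filter (fun q => q.2 == aa)
      = ys.filter (fun q => q.2 == aa) := by
  induction ys with
  | nil => simp [PySem.List.insertBy, hx]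
  | cons y ys ih =>
    simp only [PySem.List.insertBy]
    split_ifs with h
    · simp [hx]
    · simp only [List.filter_cons, ih]

theorem pv_filter_insertBy_eq (x : String × String) (ys : List (String × String)) (aa : String)
    (hs : ys.Pairwise (fun a b => a.2 ≤ b.2)) (hx : x.2 = aa) :
    (PySem.List.insertBy (fun a b => decide (a.2 < b.2)) x ys).filter (fun q => q.2 == aa)
      = ys.filter (fun q => q.2 == aa) ++ [x] := by
  induction ys with
  | nil => simp [PySem.List.insertBy, hx]
  | cons y ys ih =>
    rw [List.pairwise_cons] at hs
    simp only [PySem.List.insertBy]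
    split_ifs with h
    · -- x.2 < y.2 : nothing in y :: ys has amino acid aa
      have hlt : x.2 < y.2 := by simpa using h
      have hnone : ∀ z ∈ y :: ys, z.2 ≠ aa := by
        intro z hz
        rcases List.mem_cons.mp hz with rfl | hz
        · exact fun hzaa => absurd (hx ▸ hzaa ▸ hlt) (lt_irrefl _)
        · have : y.2 ≤ z.2 := hs.1 z hz
          exact fun hzaa => absurd (lt_of_lt_of_le hlt this) (by rw [hzaa, hx]; exact lt_irrefl _)
      have h1 : (y :: ys).filter (fun q => q.2 == aa) = [] := by
        rw [List.filter_eq_nil_iff]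
        intro z hz; simpa using hnone z hz
      rw [show List.filter (fun q => q.2 == aa) (x :: y :: ys)
            = x :: List.filter (fun q => q.2 == aa) (y :: ys) from by
          simp [List.filter_cons, hx], h1]
      simp
    · simp only [List.filter_cons, ih hs.2]
      split <;> simp

-- stable sort: filtering one amino-acid class out of the sorted list gives the original subsequence
theorem pv_filter_sorted (g : List (String × String)) (aa : String) :
    (PySem.List.sorted g (fun kv => kv.2) false).filter (fun q => q.2 == aa)
      = g.filter (fun q => q.2 == aa) := by
  induction g using List.reverseRecOn with
  | nil => simp [PySem.List.sorted]
  | append_singleton xs x ih =>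
    have hfold := PySem.List.sorted_eq_foldl_insertBy (xs ++ [x]) (fun kv : String × String => kv.2)
    rw [List.foldl_append, ← PySem.List.sorted_eq_foldl_insertBy xs (fun kv : String × String => kv.2)] at hfold
    rw [hfold, List.foldl_cons, List.foldl_nil]
    by_cases hx : x.2 = aa
    · rw [pv_filter_insertBy_eq x _ aa (PySem.List.sorted_pairwise xs (fun kv => kv.2)) hx, ih]
      simp [List.filter_append, hx]
    · rw [pv_filter_insertBy_ne x _ aa hx, ih]
      simp [List.filter_append, hx]

-- ---- B-side: the run-collecting scan over a key-sorted list builds exactly the filters ----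
theorem pv_run_getD (zs : List (String × String)) (d : PySem.Dict String (List String))
    (gr : List String) (pv aa : String)
    (hps : zs.Pairwise (fun a b => a.2 ≤ b.2)) (hge : ∀ z ∈ zs, pv ≤ z.2) (hgr : gr ≠ []) :
    (pvFinish (zs.foldl pvStep (d, gr, some pv))).getD aa []
      = if aa = pv then gr ++ (zs.filter (fun q => q.2 == aa)).map Prod.fst
        else if aa ∈ zs.map Prod.snd then (zs.filter (fun q => q.2 == aa)).map Prod.fst
        else d.getD aa [] := by
  induction zs generalizing d gr pv with
  | nil =>
    simp only [List.foldl_nil, pvFinish, if_pos hgr]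
    rw [PySem.Dict.getD_insert]
    simp only [Option.getD_some, List.filter_nil, List.map_nil, List.append_nil,
      List.map_nil, List.not_mem_nil, if_false]
    rfl
  | cons z zs ih =>
    rw [List.pairwise_cons] at hps
    rw [List.foldl_cons]
    by_cases hz : z.2 = pv
    · -- run continues
      have hstep : pvStep (d, gr, some pv) z = (d, gr ++ [z.1], some pv) := by
        simp [pvStep, hz]
      rw [hstep, ih d (gr ++ [z.1]) pv hps.2
        (fun y hy => le_trans (hge z List.mem_cons_self) (hz ▸ hps.1 y hy))
        (by simp)]
      by_cases haa : aa = pv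
      · simp only [if_pos haa, List.filter_cons,
          show ((z.2 == aa) = true) from by simp [hz, haa]]
        simp
      · have hzne : (z.2 == aa) = false := by
          simp only [beq_eq_false_iff_ne]; exact fun h => haa (h ▸ hz ▸ rfl)
        have hfc : (z :: zs).filter (fun q => q.2 == aa) = zs.filter (fun q => q.2 == aa) := by
          simp [hzne]
        rw [if_neg haa, if_neg haa, hfc]
        by_cases hmem : aa ∈ zs.map Prod.snd
        · rw [if_pos hmem, if_pos (by simp only [List.map_cons, List.mem_cons]; exact Or.inr hmem)]
        · rw [if_neg hmem, if_neg (by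
            simp only [List.map_cons, List.mem_cons]
            push_neg
            exact ⟨fun h => haa (hz ▸ h), hmem⟩)]
    · -- key changes: flush
      have hstep : pvStep (d, gr, some pv) z = (d.insert pv gr, [z.1], some z.2) := by
        simp [pvStep, hgr, hz]
      have hplt : ∀ y ∈ zs, pv < y.2 := by
        intro y hy
        exact lt_of_lt_of_le (lt_of_le_of_ne (hge z List.mem_cons_self) (Ne.symm hz)) (hps.1 y hy)
      rw [hstep, ih (d.insert pv gr) [z.1] z.2 hps.2 hps.1 (by simp)]
      by_cases haa : aa = z.2
      · have hap : ¬ aa = pv := fun h => hz (haa.symm.trans h)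
        rw [if_pos haa, if_neg hap,
          if_pos (show aa ∈ (z :: zs).map Prod.snd by simp [haa])]
        rw [show (z :: zs).filter (fun q => q.2 == aa) = z :: zs.filter (fun q => q.2 == aa) from by
          simp [haa]]
        simp
      · rw [if_neg haa]
        have hfc : (z :: zs).filter (fun q => q.2 == aa) = zs.filter (fun q => q.2 == aa) := by
          simp only [List.filter_cons,
            show (z.2 == aa) = false from by
              simp only [beq_eq_false_iff_ne]; exact fun h => haa h.symm]
          simp
        by_cases hmem : aa ∈ zs.map Prod.snd
        · have hanp : ¬ aa = pv := by
            rcases List.mem_map.mp hmem with ⟨y, hy, hyaa⟩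
            intro h
            have hlt := hplt y hy
            rw [hyaa, h] at hlt
            exact lt_irrefl _ hlt
          rw [if_pos hmem, if_neg hanp,
            if_pos (show aa ∈ (z :: zs).map Prod.snd from by
              simp only [List.map_cons, List.mem_cons]; exact Or.inr hmem),
            hfc]
        · rw [if_neg hmem, PySem.Dict.getD_insert]
          by_cases haap : aa = pv
          · rw [if_pos haap, if_pos haap]
            have hfilt : (z :: zs).filter (fun q => q.2 == aa) = [] := by
              rw [List.filter_eq_nil_iff]
              intro y hy
              rcases List.mem_cons.mp hy with rfl | hy
              · simp only [beq_iff_eq]; exact fun h => haa h.symm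
              · simp only [beq_iff_eq]
                intro h
                have hlt := hplt y hy
                rw [h, haap] at hlt
                exact lt_irrefl _ hlt
            simp [hfilt]
          · rw [if_neg haap, if_neg haap,
              if_neg (show ¬ aa ∈ (z :: zs).map Prod.snd from by
                simp only [List.map_cons, List.mem_cons]
                rintro (h | h)
                · exact haa h
                · exact hmem h)]

-- canonical value of both programs
theorem pv_A_canon (g : List (String × String)) (hpre : (g.map Prod.fst).Nodup) :
    synonymous_codons_py g
      = g.map (fun p => (p.1, (g.filter (fun q => q.2 == p.2)).map Prod.fst)) := by
  unfold synonymous_codons_py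
  apply List.map_congr_left
  intro p hp
  rw [pv_lookup_self g hpre p hp, pv_group_getD]

theorem pv_B_canon (g : List (String × String)) :
    synonymous_codons_py_alt g
      = g.map (fun p => (p.1, (g.filter (fun q => q.2 == p.2)).map Prod.fst)) := by
  unfold synonymous_codons_py_alt
  apply List.map_congr_left
  intro p hp
  have hpmem : p ∈ PySem.List.sorted g (fun kv => kv.2) false :=
    (PySem.List.mem_sorted g _ false p).mpr hp
  rcases hys : PySem.List.sorted g (fun kv => kv.2) false with _ | ⟨y, t⟩
  · rw [hys] at hpmem; exact absurd hpmem (List.not_mem_nil)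
  · have hpw : (y :: t).Pairwise (fun a b : String × String => a.2 ≤ b.2) := by
      rw [← hys]; exact PySem.List.sorted_pairwise g (fun kv => kv.2)
    rw [List.pairwise_cons] at hpw
    have hstep : pvStep (PySem.Dict.empty, [], none) y = (PySem.Dict.empty, [y.1], some y.2) := by
      simp [pvStep]
    rw [List.foldl_cons, hstep,
      pv_run_getD t PySem.Dict.empty [y.1] y.2 p.2 hpw.2 hpw.1 (by simp)]
    rw [hys] at hpmem
    by_cases haa : p.2 = y.2
    · rw [if_pos haa]
      have h1 : ([y.1] ++ (t.filter (fun q => q.2 == p.2)).map Prod.fst)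
          = (((y :: t).filter (fun q => q.2 == p.2)).map Prod.fst) := by
        simp only [List.filter_cons,
          show (y.2 == p.2) = true from by simp [haa]]
        simp
      rw [List.singleton_append] at h1 ⊢
      rw [h1, ← hys, pv_filter_sorted]
    · rw [if_neg haa]
      have hmem : p.2 ∈ t.map Prod.snd := by
        rcases List.mem_cons.mp hpmem with rfl | hpt
        · exact absurd rfl haa
        · exact List.mem_map.mpr ⟨p, hpt, rfl⟩
      rw [if_pos hmem]
      have h1 : (t.filter (fun q => q.2 == p.2)) = ((y :: t).filter (fun q => q.2 == p.2)) := by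
        simp only [List.filter_cons,
          show (y.2 == p.2) = false from by
            simp only [beq_eq_false_iff_ne]; exact fun h => haa h.symm]
        simp
      rw [h1, ← hys, pv_filter_sorted]

-- ===== VERDICT (by name: the statement is the Claim_ definition above) =====
theorem synonymous_codons_py_spec : Claim_equal_synonymous_codons_py := by
  intro g _ hpre
  unfold Spec_synonymous_codons_py
  rw [pv_A_canon g hpre, pv_B_canon g]
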